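-- pv_equiv track=rewrite | github.com/uranm/symplactix | symplectic_code.py | design_words_of_size_k
-- ===== SOURCE A (Python) =====
-- def design_words_of_size_k(n, k, Words = [[]]):
--     if k == 0:
--         return Words
--     temp_Words = [ word for word in Words ]
--     Words = []
--     for word in temp_Words:
--         for i in range(1,n+1):
--             Words.append(word + [i])
--     return design_words_of_size_k(n, k-1, Words)
-- ===== SOURCE B (Python) =====
-- def design_words_of_size_k(n, k, Words = [[]]):
--     result = Words
--     while k != 0:
--         result = [w + [i] for w in result for i in range(1, n + 1)]
--         k -= 1
--     return result
-- ===== Notes on version B (the rewrite author's own statement) =====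
-- stated objective: simpler
-- what changed: Replaces the k-level recursion with an iterative while loop over a single flat comprehension accumulator.
import Mathlib
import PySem

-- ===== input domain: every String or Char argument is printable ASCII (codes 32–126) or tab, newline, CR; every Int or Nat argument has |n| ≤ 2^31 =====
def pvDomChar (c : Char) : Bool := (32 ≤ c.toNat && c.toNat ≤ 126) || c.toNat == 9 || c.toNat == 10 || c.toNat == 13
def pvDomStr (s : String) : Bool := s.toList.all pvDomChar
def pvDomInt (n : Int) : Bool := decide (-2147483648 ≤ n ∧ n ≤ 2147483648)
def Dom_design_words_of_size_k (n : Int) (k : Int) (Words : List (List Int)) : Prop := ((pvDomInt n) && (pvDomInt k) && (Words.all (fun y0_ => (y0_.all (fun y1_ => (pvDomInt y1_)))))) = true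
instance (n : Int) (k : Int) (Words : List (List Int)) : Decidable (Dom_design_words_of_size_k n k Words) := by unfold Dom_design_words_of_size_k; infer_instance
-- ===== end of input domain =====

-- B replaces A's recursion on k by an iterative loop with one flat comprehension per step (objective: simpler).


-- ===== PORT A =====
-- A's recursion on k, counted by a Nat fuel k.toNat (exact for k ≥ 0; for k < 0 Python A diverges, excluded by Pre_).
def designA_rec (n : Int) : Nat → List (List Int) → List (List Int)
  | 0, Words => Words
  | Nat.succ m, Words =>
      -- temp_Words = list(Words); Words = []; nested for-loops appending word + [i]
      designA_rec n m
        (Words.foldl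
          (fun acc word =>
            (PySem.List.pyRange 1 (n + 1) 1).foldl (fun acc2 i => acc2 ++ [word ++ [i]]) acc)
          [])

def design_words_of_size_k (n : Int) (k : Int) (Words : List (List Int)) : List (List Int) :=
  designA_rec n k.toNat Words

-- ===== PORT B =====
-- B's while loop: k iterations (k ≥ 0 by Pre_), each replacing the accumulator by a flat comprehension.
def design_words_of_size_k_alt (n : Int) (k : Int) (Words : List (List Int)) : List (List Int) :=
  (List.range k.toNat).foldl
    (fun result _ =>
      result.flatMap (fun w => (PySem.List.pyRange 1 (n + 1) 1).map (fun i => w ++ [i])))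
    Words

-- ===== PRECONDITION & SPEC =====
-- Pre_ excludes k < 0, on which Python A recurses forever (RecursionError) and B loops forever.
def Pre_design_words_of_size_k (n : Int) (k : Int) (Words : List (List Int)) : Prop := 0 ≤ k
instance (n : Int) (k : Int) (Words : List (List Int)) : Decidable (Pre_design_words_of_size_k n k Words) := by unfold Pre_design_words_of_size_k; infer_instance
def pvWitness_design_words_of_size_k : Int × Int × List (List Int) := (2, 2, [[]])

def Spec_design_words_of_size_k (n : Int) (k : Int) (Words : List (List Int)) (out : List (List Int)) : Prop := out = design_words_of_size_k_alt n k Words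
instance (n : Int) (k : Int) (Words : List (List Int)) (out : List (List Int)) : Decidable (Spec_design_words_of_size_k n k Words out) := by unfold Spec_design_words_of_size_k; infer_instance

-- ===== CLAIM (what is proved, stated in full; the proofs are below) =====
def Claim_equal_design_words_of_size_k : Prop := ∀ (n : Int) (k : Int) (Words : List (List Int)), Dom_design_words_of_size_k n k Words → Pre_design_words_of_size_k n k Words → Spec_design_words_of_size_k n k Words (design_words_of_size_k n k Words)

-- ===== LEMMAS AND PROOFS =====

-- One step of A (nested append loops from []) is one step of B (flatMap of a map).
theorem stepA_eq_stepB (n : Int) (Words : List (List Int)) :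
    Words.foldl
      (fun acc word =>
        (PySem.List.pyRange 1 (n + 1) 1).foldl (fun acc2 i => acc2 ++ [word ++ [i]]) acc)
      []
    = Words.flatMap (fun w => (PySem.List.pyRange 1 (n + 1) 1).map (fun i => w ++ [i])) := by
  have inner : ∀ (w : List Int) (acc : List (List Int)),
      (PySem.List.pyRange 1 (n + 1) 1).foldl (fun acc2 i => acc2 ++ [w ++ [i]]) acc
        = acc ++ (PySem.List.pyRange 1 (n + 1) 1).map (fun i => w ++ [i]) := by
    intro w acc
    rw [PySem.List.foldl_append_eq_flatMap (g := fun i => [w ++ [i]])]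
    congr 1
    induction PySem.List.pyRange 1 (n + 1) 1 with
    | nil => simp
    | cons a l ihl => simp [ihl]
  have outer : ∀ (init : List (List Int)),
      Words.foldl
        (fun acc word =>
          (PySem.List.pyRange 1 (n + 1) 1).foldl (fun acc2 i => acc2 ++ [word ++ [i]]) acc)
        init
      = init ++ Words.flatMap (fun w => (PySem.List.pyRange 1 (n + 1) 1).map (fun i => w ++ [i])) := by
    induction Words with
    | nil => intro init; simp
    | cons w ws ih =>
        intro init
        rw [List.foldl_cons, ih, inner]
        simp
  simpa using outer []

-- A's fuel recursion equals m-fold iteration of B's step.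
theorem designA_rec_eq_foldl (n : Int) (m : Nat) (Words : List (List Int)) :
    designA_rec n m Words
      = (List.range m).foldl
          (fun result _ =>
            result.flatMap (fun w => (PySem.List.pyRange 1 (n + 1) 1).map (fun i => w ++ [i])))
          Words := by
  induction m generalizing Words with
  | zero => simp [designA_rec]
  | succ m ih =>
      rw [List.range_succ_eq_map]
      simp only [designA_rec, stepA_eq_stepB, List.foldl_cons, List.foldl_map]
      exact ih _

-- ===== VERDICT (by name: the statement is the Claim_ definition above) =====
theorem design_words_of_size_k_spec : Claim_equal_design_words_of_size_k := by
  intro n k Words _ _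
  unfold Spec_design_words_of_size_k design_words_of_size_k design_words_of_size_k_alt
  exact designA_rec_eq_foldl n k.toNat Words
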